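-- pv_equiv track=rewrite | github.com/Zhou-London/comp0009 | src/tableau.py | is_pred_atom
-- ===== SOURCE A (Python) =====
-- def is_pred_atom(fmla: str) -> bool:
--     if len(fmla) < 4:
--         return False
--     if not fmla[0].isupper() or fmla[1] != '(' or fmla[-1] != ')':
--         return False
--
--     args = fmla[2:-1]
--     if not args:
--         return False
--
--     parts = args.split(',')
--     return all(len(p) == 1 and p.islower() for p in parts)
-- ===== SOURCE B (Python) =====
-- def is_pred_atom(fmla: str) -> bool:
--     cs = list(fmla)
--     return (len(cs) >= 4 and cs[0].isupper() and cs[1] == '('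
--             and _args(cs[2:]))
--
-- def _args(cs):
--     # iterative consumer of the tail: eat "lowercase" / "," pairs two characters
--     # at a time; accept exactly when a lowercase is followed by the final ')'
--     i, n = 0, len(cs)
--     while True:
--         if n - i < 2 or not cs[i].islower():
--             return False
--         if cs[i + 1] == ')':
--             return i + 2 == n
--         if cs[i + 1] != ',':
--             return False
--         i += 2
-- ===== Notes on version B (the rewrite author's own statement) =====
-- stated objective: alternative
-- what changed: Replaces slicing off the closing parenthesis plus args.split on commas plus an all() over the pieces by a single left-to-right consumer of the tail that eats a lowercase letter and a separator two characters at a time and accepts exactly when a lowercase letter is followed by the final closing parenthesis; no intermediate list of pieces.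
import Mathlib
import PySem

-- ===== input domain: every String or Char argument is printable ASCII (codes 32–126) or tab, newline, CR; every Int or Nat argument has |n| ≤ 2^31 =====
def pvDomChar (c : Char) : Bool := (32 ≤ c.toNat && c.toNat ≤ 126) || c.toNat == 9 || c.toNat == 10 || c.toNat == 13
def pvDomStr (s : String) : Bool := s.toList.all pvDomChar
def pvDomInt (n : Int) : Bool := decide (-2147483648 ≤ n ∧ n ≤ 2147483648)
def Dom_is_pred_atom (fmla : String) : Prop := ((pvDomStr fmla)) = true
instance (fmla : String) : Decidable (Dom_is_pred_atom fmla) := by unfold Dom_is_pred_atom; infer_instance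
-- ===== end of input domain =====

-- B replaces the slice-off-')' + args.split(',') + all() pipeline by a recursive-descent
-- consumer of the tail that eats "lowercase" / "," pairs and accepts exactly on a final
-- "lowercase ')'": an alternative decomposition, no slices and no intermediate piece list.


-- ===== PORT A =====
-- literal transliteration of A; indices 0, 1, -1 are in range after the length check,
-- so pyGet? always returns some and the .getD ' ' default is never used.
def is_pred_atom (fmla : String) : Bool :=
  if fmla.toList.length < 4 then false
  else if !(PySem.Chars.isupper ((PySem.List.pyGet? fmla.toList 0).getD ' '))
          || ((PySem.List.pyGet? fmla.toList 1).getD ' ' != '(')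
          || ((PySem.List.pyGet? fmla.toList (-1)).getD ' ' != ')') then false
  else if (PySem.List.slice fmla.toList (some 2) (some (-1))).isEmpty then false
  else (PySem.Chars.splitOn (PySem.List.slice fmla.toList (some 2) (some (-1))) [',']).all
    (fun p => p.length == 1 && PySem.Chars.islower (p.headD ' '))

-- ===== PORT B =====
-- _args of Source B: the while-True loop becomes recursion on the index i (measure n - i);
-- cs[i], cs[i+1] are in range under the n - i >= 2 guard, so getD with a default is exact.
def pvArgs (cs : List Char) (i : Nat) : Bool :=
  if _h : cs.length - i < 2 then false
  else if !PySem.Chars.islower (cs.getD i ' ') then false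
  else if cs.getD (i + 1) ' ' == ')' then decide (i + 2 = cs.length)
  else if cs.getD (i + 1) ' ' != ',' then false
  else pvArgs cs (i + 2)
termination_by cs.length - i
decreasing_by omega

-- Source B's is_pred_atom; cs[0]/cs[1] are guarded by `len(cs) >= 4` in the short-circuit
-- chain, so headD with a default is exact.
def is_pred_atom_alt (fmla : String) : Bool :=
  decide (4 ≤ fmla.toList.length)
    && PySem.Chars.isupper (fmla.toList.headD ' ')
    && ((fmla.toList.drop 1).headD ' ' == '(')
    && pvArgs (fmla.toList.drop 2) 0

-- ===== PRECONDITION & SPEC =====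
def Spec_is_pred_atom (fmla : String) (out : Bool) : Prop := out = is_pred_atom_alt fmla
instance (fmla : String) (out : Bool) : Decidable (Spec_is_pred_atom fmla out) := by unfold Spec_is_pred_atom; infer_instance

-- ===== CLAIM (what is proved, stated in full; the proofs are below) =====
def Claim_equal_is_pred_atom : Prop := ∀ (fmla : String), Dom_is_pred_atom fmla → Spec_is_pred_atom fmla (is_pred_atom fmla)

-- ===== LEMMAS AND PROOFS =====

-- structural account of B's loop: the tail as "lowercase (',' lowercase)* ')'"
def pvArgsL : List Char → Bool
  | c :: d :: rest =>
    if !PySem.Chars.islower c then false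
    else if d == ')' then rest == ([] : List Char)
    else if d != ',' then false
    else pvArgsL rest
  | _ => false

-- the condition A tests on each piece produced by split(',')
def pvPieceOk (p : List Char) : Bool := p.length == 1 && PySem.Chars.islower (p.headD ' ')

-- structural account of scanning args as a ','-separated list of one-char lowercase pieces,
-- with pre the current piece so far
def pvScan (pre : List Char) : List Char → Bool
  | [] => pvPieceOk pre
  | c :: rest => if c = ',' then pvPieceOk pre && pvScan [] rest else pvScan (pre ++ [c]) rest

-- "c (',' c)* with every c lowercase"
def pvGood : List Char → Bool
  | [] => false
  | [c] => PySem.Chars.islower c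
  | c :: d :: rest => PySem.Chars.islower c && d == ',' && pvGood rest

theorem pvScan_go :
    ∀ (fuel : Nat) (l cur : List Char) (acc : List (List Char)), l.length < fuel →
      (PySem.Chars.splitOn.go [','] fuel l cur acc).all pvPieceOk
        = (acc.all pvPieceOk && pvScan cur.reverse l) := by
  intro fuel
  induction fuel with
  | zero => intro l cur acc h; omega
  | succ n ih =>
    intro l cur acc h
    cases l with
    | nil =>
      rw [PySem.Chars.splitOn.go.eq_def]
      simp [pvScan, List.all_reverse, Bool.and_comm]
    | cons c rest =>
      rw [PySem.Chars.splitOn.go.eq_def]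
      by_cases hc : c = ','
      · subst hc
        have hpre : List.isPrefixOf [','] (',' :: rest) = true := by
          simp [List.isPrefixOf]
        simp only [hpre, if_pos]
        rw [ih _ _ _ (by simpa using Nat.lt_of_succ_lt_succ h)]
        rw [show pvScan cur.reverse (',' :: rest) = (pvPieceOk cur.reverse && pvScan [] rest) from by
          simp [pvScan]]
        simp only [List.all_cons]
        cases acc.all pvPieceOk <;> cases pvPieceOk cur.reverse <;> simp
      · have hpre : List.isPrefixOf [','] (c :: rest) = false := by
          simp only [List.isPrefixOf, Bool.and_true, beq_eq_false_iff_ne, ne_eq]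
          exact fun h => hc h.symm
        simp only [hpre, Bool.false_eq_true, if_neg, not_false_iff]
        rw [ih _ _ _ (by simpa using Nat.lt_of_succ_lt_succ h)]
        simp [pvScan, hc]

theorem pvScan_long (pre : List Char) (hp : 2 ≤ pre.length) :
    ∀ l, pvScan pre l = false := by
  intro l
  induction l generalizing pre with
  | nil => simp [pvScan, pvPieceOk]; omega
  | cons c rest ih =>
    by_cases hc : c = ','
    · subst hc
      simp [pvScan, pvPieceOk]
      intro h; omega
    · simp only [pvScan, if_neg hc]
      exact ih _ (by simp; omega)

theorem pvScan_eq_good : ∀ args, pvScan [] args = pvGood args := by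
  intro args
  induction args using pvGood.induct with
  | case1 => simp [pvScan, pvGood, pvPieceOk]
  | case2 c =>
    by_cases hc : c = ','
    · subst hc; simp [pvScan, pvGood, pvPieceOk, PySem.Chars.islower]
    · simp [pvScan, pvGood, pvPieceOk, hc]
  | case3 c d rest ih =>
    by_cases hc : c = ','
    · subst hc
      simp [pvScan, pvGood, pvPieceOk, PySem.Chars.islower]
    · simp only [pvScan, if_neg hc, List.nil_append]
      by_cases hd : d = ','
      · subst hd
        simp [pvGood, pvPieceOk, ih]
      · simp only [if_neg hd]
        rw [pvScan_long _ (by simp)]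
        simp [pvGood, hd]

theorem pvSplit_all_eq_good (args : List Char) :
    (PySem.Chars.splitOn args [',']).all pvPieceOk = pvGood args := by
  unfold PySem.Chars.splitOn
  rw [pvScan_go _ _ _ _ (by omega)]
  simp [pvScan_eq_good]

-- B's recursive descent on args ++ [')'] is A's piecewise check on args, with the
-- closing-parenthesis test factored out.
theorem pvArgsL_append : ∀ (args : List Char) (x : Char),
    pvArgsL (args ++ [x]) = ((x == ')') && pvGood args) := by
  intro args
  induction args using pvGood.induct with
  | case1 => intro x; simp [pvArgsL, pvGood]
  | case2 c =>
    intro x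
    by_cases hl : PySem.Chars.islower c = true
    · by_cases hx : x = ')'
      · subst hx; simp [pvArgsL, pvGood, hl]
      · by_cases hc : x = ','
        · subst hc; simp [pvArgsL, pvGood, hl]
        · simp [pvArgsL, pvGood, hl, hx, hc]
    · simp [pvArgsL, pvGood, hl]
  | case3 c d rest ih =>
    intro x
    by_cases hl : PySem.Chars.islower c = true
    · by_cases hd : d = ')'
      · subst hd; simp [pvArgsL, pvGood, hl]
      · by_cases hc : d = ','
        · subst hc; simp only [List.cons_append, pvArgsL, pvGood]
          simp [hl, ih x]
        · simp [pvArgsL, pvGood, hl, hd, hc]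
    · simp [pvArgsL, pvGood, hl]

-- fmla[2:-1] for a string of length ≥ 3
theorem pvSlice_two_neg_one (cs : List Char) (h : 3 ≤ cs.length) :
    PySem.List.slice cs (some 2) (some (-1)) = (cs.drop 2).dropLast := by
  have hne : cs ≠ [] := by intro e; subst e; simp at h
  have h1 : min 2 cs.length = 2 := by omega
  have h2 : ((cs.length : Int) + -1).toNat = cs.length - 1 := by omega
  simp [PySem.List.slice, PySem.List.clampIdx, List.dropLast_eq_take, hne, h1, h2]
  omega

theorem pvArgsL_short (l : List Char) (h : l.length < 2) : pvArgsL l = false := by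
  match l, h with
  | [], _ => rfl
  | [c], _ => rfl

-- the indexed loop of the port equals the structural account on the dropped tail
theorem pvArgs_eq (cs : List Char) (i : Nat) : pvArgs cs i = pvArgsL (cs.drop i) := by
  induction i using pvArgs.induct (cs := cs) with
  | case1 i h =>
    rw [pvArgs]
    simp only [h, dite_true]
    rw [pvArgsL_short _ (by simp; omega)]
  | case2 i h hlow =>
    rw [pvArgs]
    rw [List.drop_eq_getElem_cons (by omega), List.getD_eq_getElem _ _ (by omega)] at *
    rw [List.drop_eq_getElem_cons (l := cs) (by omega)]
    simp_all [pvArgsL]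
  | case3 i h hlow hpar =>
    rw [pvArgs]
    rw [List.drop_eq_getElem_cons (by omega), List.drop_eq_getElem_cons (l := cs) (i := i + 1) (by omega)]
    rw [List.getD_eq_getElem _ _ (by omega), List.getD_eq_getElem _ _ (by omega)] at *
    simp_all [pvArgsL]
    show decide (i + 2 = cs.length) = (List.drop (i + 1 + 1) cs).isEmpty
    rcases Nat.lt_or_ge (i + 2) cs.length with hlt | hge
    · rw [decide_eq_false (by omega)]
      have he : (List.drop (i + 1 + 1) cs).isEmpty = false := by
        simp [List.drop_eq_nil_iff]; omega
      rw [he]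
    · rw [decide_eq_true (by omega : i + 2 = cs.length)]
      have he : (List.drop (i + 1 + 1) cs).isEmpty = true := by
        simp [List.isEmpty_iff, List.drop_eq_nil_iff]; omega
      rw [he]
  | case4 i h hlow hpar hcom =>
    rw [pvArgs]
    rw [List.drop_eq_getElem_cons (by omega), List.drop_eq_getElem_cons (l := cs) (i := i + 1) (by omega)]
    rw [List.getD_eq_getElem _ _ (by omega), List.getD_eq_getElem _ _ (by omega)] at *
    simp_all [pvArgsL]
  | case5 i h hlow hpar hcom ih =>
    rw [pvArgs]
    rw [List.drop_eq_getElem_cons (by omega), List.drop_eq_getElem_cons (l := cs) (i := i + 1) (by omega)] 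
    rw [List.getD_eq_getElem _ _ (by omega), List.getD_eq_getElem _ _ (by omega)] at *
    simp_all [pvArgsL]

-- ===== VERDICT (by name: the statement is the Claim_ definition above) =====
theorem is_pred_atom_spec : Claim_equal_is_pred_atom := by
  intro fmla _
  unfold Spec_is_pred_atom is_pred_atom is_pred_atom_alt
  generalize fmla.toList = cs
  by_cases h4 : cs.length < 4
  · rw [if_pos h4]
    have : decide (4 ≤ cs.length) = false := by simp; omega
    rw [this]; simp
  · rw [if_neg h4]
    have hlen : 4 ≤ cs.length := by omega
    obtain ⟨c0, cs1⟩ : ∃ c0 cs1, cs = c0 :: cs1 := by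
      cases cs with
      | nil => simp at hlen
      | cons a b => exact ⟨a, b, rfl⟩
    obtain ⟨c1, t, rfl⟩ : ∃ c1 t, cs = c0 :: c1 :: t := by
      obtain ⟨cs1, rfl⟩ := cs1
      cases cs1 with
      | nil => simp at hlen
      | cons a b => exact ⟨a, b, rfl⟩
    simp only [List.length_cons] at hlen h4
    have htne : t ≠ [] := by intro e; subst e; simp at hlen
    obtain ⟨init, L, hT⟩ := (List.eq_nil_or_concat t).resolve_left htne
    rw [List.concat_eq_append] at hT
    subst hT
    have hinitne : init ≠ [] := by
      intro e; subst e; simp at hlen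
    have hshape : c0 :: c1 :: (init ++ [L]) = (c0 :: c1 :: init) ++ [L] := by simp
    have hlast : PySem.List.pyGet? (c0 :: c1 :: (init ++ [L])) (-1) = some L := by
      rw [hshape, PySem.List.pyGet?_neg_one_append_singleton]
    have h1 : PySem.List.pyGet? (c0 :: c1 :: (init ++ [L])) 1 = some c1 := by
      have h01 : (0 : Int) ≤ (init.length : Int) + 1 := by positivity
      simp [PySem.List.pyGet?, PySem.List.pyIdx?, h01]
    have hslice : PySem.List.slice (c0 :: c1 :: (init ++ [L])) (some 2) (some (-1)) = init := by
      rw [pvSlice_two_neg_one _ (by simp)]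
      simp
    rw [hslice, hlast, h1, PySem.List.pyGet?_zero_cons]
    have hd4 : decide (4 ≤ (c0 :: c1 :: (init ++ [L])).length) = true := by
      rw [decide_eq_true_eq]
      have hL1 : (init ++ [L]).length = init.length + 1 := by simp
      simp only [List.length_cons, hL1]
      omega
    rw [hd4]
    have hdrop : (c0 :: c1 :: (init ++ [L])).drop 2 = init ++ [L] := rfl
    rw [pvArgs_eq, List.drop_zero, hdrop, pvArgsL_append]
    have hAll : (PySem.Chars.splitOn init [',']).all
        (fun p => p.length == 1 && PySem.Chars.islower (p.headD ' ')) = pvGood init :=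
      pvSplit_all_eq_good init
    rw [hAll]
    by_cases hu : PySem.Chars.isupper c0 = true
    · by_cases hp : c1 = '('
      · by_cases hL : L = ')'
        · subst hL
          simp [hu, hp, hinitne]
        · simp [hu, hp, hL]
      · simp [hu, hp]
    · simp [Bool.not_eq_true] at hu
      simp [hu]
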